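-- pv_equiv track=rewrite | github.com/Telmooo/FEUP | 1st_Year/Programming-Fundamentals/PE/2/exactly.py | exactly
-- ===== SOURCE A (Python) =====
-- def exactly(s):
-- 	ok = ()
-- 	for i in range(len(s)-1):
-- 		for j in range(i+1, len(s)):
-- 			if s[i].isdigit() and s[j].isdigit() and int(s[i]) + int(s[j]) == 10:
-- 				temp = s[i+1:j]
-- 				if temp.count("?") == 3:
-- 					ok += (s[i] + s[j],)
-- 				else:
-- 					violation = (s[i] + s[j],)
-- 					return f"The sequence {s} is NOT OK with first violation with pair: {violation}"
-- 	return f"The sequence {s} is OK with the pairs: {ok}"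
-- ===== SOURCE B (Python) =====
-- def _tuple_repr(xs):
--     return "(" + ", ".join("'" + x + "'" for x in xs) + (",)" if len(xs) == 1 else ")")
--
--
-- def exactly(s):
--     n = len(s)
--     # prefix counts of '?': pref[k] = number of '?' in s[:k]
--     pref = [0] * (n + 1)
--     for k, c in enumerate(s):
--         pref[k + 1] = pref[k] + (c == "?")
--     # positions of digit characters, in order
--     digs = [(k, c) for k, c in enumerate(s) if c.isdigit()]
--     ok = []
--     for a, (i, ci) in enumerate(digs):
--         for j, cj in digs[a + 1:]:
--             if int(ci) + int(cj) == 10: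
--                 pair = ci + cj
--                 if pref[j] - pref[i + 1] == 3:
--                     ok.append(pair)
--                 else:
--                     return ("The sequence " + s +
--                             " is NOT OK with first violation with pair: " + _tuple_repr([pair]))
--     return "The sequence " + s + " is OK with the pairs: " + _tuple_repr(ok)
-- ===== Notes on version B (the rewrite author's own statement) =====
-- stated objective: faster
-- what changed: B precomputes a prefix-sum array of question-mark counts and the list of digit positions once, then scans only digit-position pairs with an O(1) between-range query, instead of A's all-pairs double loop with an O(n) slice-and-count inside.
import Mathlib
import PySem

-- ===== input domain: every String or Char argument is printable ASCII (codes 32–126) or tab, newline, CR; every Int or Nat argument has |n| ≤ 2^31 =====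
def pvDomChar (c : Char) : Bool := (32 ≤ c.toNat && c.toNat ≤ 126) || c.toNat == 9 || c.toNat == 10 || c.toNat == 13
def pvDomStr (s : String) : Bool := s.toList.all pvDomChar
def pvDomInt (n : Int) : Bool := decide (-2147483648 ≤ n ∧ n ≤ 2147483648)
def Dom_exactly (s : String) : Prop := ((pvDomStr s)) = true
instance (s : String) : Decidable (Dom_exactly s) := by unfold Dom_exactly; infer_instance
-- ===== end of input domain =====

-- B replaces A's all-pairs scan with an O(n) slice-and-count inside by a precomputed
-- prefix-sum array of question-mark counts and a precomputed list of digit positions (objective: faster).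

-- shared: int(c) for a digit character (exact on ASCII digits, the only place it is used)
def digitVal (c : Char) : Nat := c.toNat - 48

-- shared: Python's repr of a tuple of digit-pair strings, e.g. (), ('19',), ('19', '28')
-- (exact: the strings contain only digits, so repr quotes with ' and escapes nothing)
def pyTupleRepr (xs : List String) : String :=
  "(" ++ String.intercalate ", " (xs.map fun x => "'" ++ x ++ "'") ++
    (if xs.length == 1 then ",)" else ")")

-- ===== PORT A =====
-- inner loop `for j in range(i+1, len(s))`; Sum.inr = the early `return`
def exactlyAInner (cs : List Char) (s : String) (i : Nat) (js : List Nat)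
    (ok : List String) : List String ⊕ String :=
  match js with
  | [] => Sum.inl ok
  | j :: rest =>
    let ci := cs.getD i ' '
    let cj := cs.getD j ' '
    if ci.isDigit && cj.isDigit && (digitVal ci + digitVal cj == 10) then
      -- temp = s[i+1:j]; temp.count("?")  (indices i < j < len, so the slice is exact)
      if ((cs.drop (i+1)).take (j - (i+1))).count '?' == 3 then
        exactlyAInner cs s i rest (ok ++ [String.ofList [ci, cj]])
      else
        Sum.inr ("The sequence " ++ s ++
          " is NOT OK with first violation with pair: " ++ pyTupleRepr [String.ofList [ci, cj]])
    else exactlyAInner cs s i rest ok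

-- outer loop `for i in range(len(s)-1)`
def exactlyAOuter (cs : List Char) (s : String) (n : Nat) (is_ : List Nat)
    (ok : List String) : List String ⊕ String :=
  match is_ with
  | [] => Sum.inl ok
  | i :: rest =>
    match exactlyAInner cs s i (List.range' (i+1) (n - (i+1))) ok with
    | Sum.inl ok' => exactlyAOuter cs s n rest ok'
    | Sum.inr v => Sum.inr v

def exactly (s : String) : String :=
  let cs := s.toList
  let n := cs.length
  match exactlyAOuter cs s n (List.range (n-1)) [] with
  | Sum.inl ok => "The sequence " ++ s ++ " is OK with the pairs: " ++ pyTupleRepr ok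
  | Sum.inr v => v

-- ===== PORT B =====
-- prefix-count array: pref[k] = number of question marks in s[:k]  (Source B's accumulation loop)
def prefQ (cs : List Char) : List Nat :=
  cs.scanl (fun a c => a + (if c == '?' then 1 else 0)) 0

-- index/char pairs, Source B's enumerate(s)
def enumIdx (cs : List Char) (k : Nat) : List (Nat × Char) :=
  match cs with
  | [] => []
  | c :: rest => (k, c) :: enumIdx rest (k+1)

-- inner loop over the later digit positions `digs[a+1:]`
def exactlyBInner (s : String) (pref : List Nat) (i : Nat) (ci : Char)
    (ds : List (Nat × Char)) (ok : List String) : List String ⊕ String :=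
  match ds with
  | [] => Sum.inl ok
  | (j, cj) :: rest =>
    if digitVal ci + digitVal cj == 10 then
      if pref.getD j 0 - pref.getD (i+1) 0 == 3 then
        exactlyBInner s pref i ci rest (ok ++ [String.ofList [ci, cj]])
      else
        Sum.inr ("The sequence " ++ s ++
          " is NOT OK with first violation with pair: " ++ pyTupleRepr [String.ofList [ci, cj]])
    else exactlyBInner s pref i ci rest ok

-- outer loop over digit positions
def exactlyBOuter (s : String) (pref : List Nat) (ds : List (Nat × Char))
    (ok : List String) : List String ⊕ String :=
  match ds with
  | [] => Sum.inl ok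
  | (i, ci) :: rest =>
    match exactlyBInner s pref i ci rest ok with
    | Sum.inl ok' => exactlyBOuter s pref rest ok'
    | Sum.inr v => Sum.inr v

def exactly_alt (s : String) : String :=
  let cs := s.toList
  let pref := prefQ cs
  let digs := (enumIdx cs 0).filter (fun p => p.2.isDigit)
  match exactlyBOuter s pref digs [] with
  | Sum.inl ok => "The sequence " ++ s ++ " is OK with the pairs: " ++ pyTupleRepr ok
  | Sum.inr v => v

-- ===== PRECONDITION & SPEC =====
def Spec_exactly (s : String) (out : String) : Prop := out = exactly_alt s
instance (s : String) (out : String) : Decidable (Spec_exactly s out) := by unfold Spec_exactly; infer_instance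

-- ===== CLAIM (what is proved, stated in full; the proofs are below) =====
def Claim_equal_exactly : Prop := ∀ (s : String), Dom_exactly s → Spec_exactly s (exactly s)

-- ===== LEMMAS AND PROOFS =====

-- the digit positions of cs among a list of indices
def digOf (cs : List Char) (j : Nat) : Option (Nat × Char) :=
  if (cs.getD j ' ').isDigit then some (j, cs.getD j ' ') else none

theorem prefQ_getD (cs : List Char) :
    ∀ (k acc : Nat), k ≤ cs.length →
      (cs.scanl (fun a c => a + (if c == '?' then 1 else 0)) acc).getD k 0
        = acc + (cs.take k).count '?' := by
  induction cs with
  | nil =>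
      intro k acc hk
      cases k with
      | zero => simp [List.scanl]
      | succ m => exact absurd hk (by simp)
  | cons c rest ih =>
      intro k acc hk
      cases k with
      | zero => simp [List.scanl]
      | succ m =>
          rw [List.scanl_cons, List.take_succ_cons, List.getD_cons_succ]
          rw [ih m (acc + (if c == '?' then 1 else 0)) (by simpa using hk), List.count_cons]
          by_cases h : c = '?'
          · simp [h]; omega
          · simp [h]

theorem prefQ_sub (cs : List Char) (i j : Nat) (hij : i + 1 ≤ j) (hj : j ≤ cs.length) :
    (prefQ cs).getD j 0 - (prefQ cs).getD (i+1) 0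
      = ((cs.drop (i+1)).take (j - (i+1))).count '?' := by
  unfold prefQ
  rw [prefQ_getD cs j 0 hj, prefQ_getD cs (i+1) 0 (by omega)]
  have hsplit : cs.take j = cs.take (i+1) ++ (cs.drop (i+1)).take (j - (i+1)) := by
    rw [← List.take_add]
    congr 1
    omega
  rw [hsplit, List.count_append]
  omega

theorem innerA_nondigit (cs : List Char) (s : String) (i : Nat)
    (h : (cs.getD i ' ').isDigit = false) :
    ∀ (js : List Nat) (ok : List String), exactlyAInner cs s i js ok = Sum.inl ok := by
  intro js
  induction js with
  | nil => intro ok; simp [exactlyAInner]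
  | cons j rest ih =>
      intro ok
      simp only [exactlyAInner, h, Bool.false_and]
      exact ih ok

theorem inner_eq (cs : List Char) (s : String) (i : Nat)
    (hci : (cs.getD i ' ').isDigit = true) :
    ∀ (js : List Nat) (ok : List String), (∀ j ∈ js, i < j ∧ j ≤ cs.length) →
      exactlyAInner cs s i js ok
        = exactlyBInner s (prefQ cs) i (cs.getD i ' ') (js.filterMap (digOf cs)) ok := by
  intro js
  induction js with
  | nil => intro ok _; simp [exactlyAInner, exactlyBInner]
  | cons j rest ih =>
      intro ok hmem
      have hj := hmem j (by simp)
      have hrest : ∀ j' ∈ rest, i < j' ∧ j' ≤ cs.length := fun j' h' => hmem j' (by simp [h'])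
      by_cases hdj : (cs.getD j ' ').isDigit
      · have hhead : digOf cs j = some (j, cs.getD j ' ') := by
          simp only [digOf, hdj, if_true]
        simp only [exactlyAInner, List.filterMap_cons, hhead, hci, hdj, Bool.true_and,
          exactlyBInner]
        by_cases hsum : digitVal (cs.getD i ' ') + digitVal (cs.getD j ' ') = 10
        · have hcnt := prefQ_sub cs i j (by omega) hj.2
          simp only [hsum, beq_self_eq_true, if_true, hcnt]
          by_cases h3 : ((cs.drop (i+1)).take (j - (i+1))).count '?' = 3
          · simp only [h3, beq_self_eq_true, if_true]
            exact ih _ hrest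
          · simp only [beq_iff_eq, h3, if_false]
        · simp only [beq_iff_eq, hsum, if_false]
          exact ih _ hrest
      · simp only [Bool.not_eq_true] at hdj
        have hhead : digOf cs j = none := by
          simp only [digOf, hdj, Bool.false_eq_true, if_false]
        simp only [exactlyAInner, List.filterMap_cons, hhead, hdj, Bool.false_and, Bool.and_false,
          Bool.false_eq_true, if_false]
        exact ih _ hrest

theorem main_eq (cs : List Char) (s : String) :
    ∀ (cnt i : Nat) (ok : List String), i + cnt = cs.length →
      exactlyAOuter cs s cs.length (List.range' i cnt) ok
        = exactlyBOuter s (prefQ cs) ((List.range' i cnt).filterMap (digOf cs)) ok := by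
  intro cnt
  induction cnt with
  | zero => intro i ok _; simp [exactlyAOuter, exactlyBOuter]
  | succ m ih =>
      intro i ok hn
      rw [List.range'_succ]
      have hjs : cs.length - (i+1) = m := by omega
      have hmem : ∀ j ∈ List.range' (i+1) m, i < j ∧ j ≤ cs.length := by
        intro j hjm
        rw [List.mem_range'] at hjm
        obtain ⟨t, ht, rfl⟩ := hjm
        omega
      by_cases hdi : (cs.getD i ' ').isDigit
      · have hhead : digOf cs i = some (i, cs.getD i ' ') := by
          simp only [digOf, hdi, if_true]
        simp only [exactlyAOuter, List.filterMap_cons, hjs, hhead, exactlyBOuter]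
        rw [inner_eq cs s i hdi _ ok hmem]
        cases hB : exactlyBInner s (prefQ cs) i (cs.getD i ' ')
            ((List.range' (i+1) m).filterMap (digOf cs)) ok with
        | inl ok' => exact ih (i+1) ok' (by omega)
        | inr v => rfl
      · simp only [Bool.not_eq_true] at hdi
        have hhead : digOf cs i = none := by
          simp only [digOf, hdi, Bool.false_eq_true, if_false]
        simp only [exactlyAOuter, List.filterMap_cons, hjs, hhead]
        rw [innerA_nondigit cs s i hdi _ ok]
        exact ih (i+1) ok (by omega)

theorem enumIdx_filter :
    ∀ (cs whole : List Char) (k : Nat),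
      (∀ m, m < cs.length → whole.getD (k + m) ' ' = cs.getD m ' ') →
      (enumIdx cs k).filter (fun p => p.2.isDigit)
        = (List.range' k cs.length).filterMap (digOf whole) := by
  intro cs
  induction cs with
  | nil => intro whole k _; simp [enumIdx]
  | cons c rest ih =>
      intro whole k h
      have h0 : whole.getD k ' ' = c := by simpa using h 0 (by simp)
      have htail : ∀ m, m < rest.length → whole.getD (k + 1 + m) ' ' = rest.getD m ' ' := by
        intro m hm
        have := h (m+1) (by simp; omega)
        simpa [Nat.add_assoc, Nat.add_comm 1 m] using this
      have hhead : digOf whole k = if c.isDigit then some (k, c) else none := by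
        simp only [digOf, h0]
      simp only [enumIdx, List.length_cons, List.range'_succ, List.filterMap_cons,
        List.filter_cons, hhead]
      by_cases hp : c.isDigit
      · simp only [hp, if_true]
        rw [ih whole (k+1) htail]
      · simp only [hp, Bool.false_eq_true, if_false]
        rw [ih whole (k+1) htail]

theorem outerA_append (cs : List Char) (s : String) (n : Nat) :
    ∀ (l1 l2 : List Nat) (ok : List String),
      exactlyAOuter cs s n (l1 ++ l2) ok
        = match exactlyAOuter cs s n l1 ok with
          | Sum.inl ok' => exactlyAOuter cs s n l2 ok'
          | Sum.inr v => Sum.inr v := by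
  intro l1
  induction l1 with
  | nil => intro l2 ok; simp [exactlyAOuter]
  | cons i rest ih =>
      intro l2 ok
      simp only [List.cons_append, exactlyAOuter]
      cases exactlyAInner cs s i (List.range' (i+1) (n - (i+1))) ok with
      | inl ok' => exact ih l2 ok'
      | inr v => rfl

theorem outerA_range_ext (cs : List Char) (s : String) (ok : List String) :
    exactlyAOuter cs s cs.length (List.range (cs.length - 1)) ok
      = exactlyAOuter cs s cs.length (List.range cs.length) ok := by
  cases hn : cs.length with
  | zero => rfl
  | succ m =>
      rw [List.range_succ, outerA_append, show m + 1 - 1 = m from rfl]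
      cases exactlyAOuter cs s (m+1) (List.range m) ok with
      | inl ok' =>
          simp [exactlyAOuter, exactlyAInner]
      | inr v => rfl

-- ===== VERDICT (by name: the statement is the Claim_ definition above) =====
theorem exactly_spec : Claim_equal_exactly := by
  intro s _
  unfold Spec_exactly exactly exactly_alt
  simp only []
  rw [outerA_range_ext]
  rw [List.range_eq_range']
  rw [main_eq s.toList s s.toList.length 0 [] (by omega)]
  rw [enumIdx_filter s.toList s.toList 0 (fun m _ => by simp)]
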